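-- pv_equiv track=rewrite | github.com/NoaBenDror/Introduction_To_Computer_Science | ex5/wordsearch.py | find_words_in_matrix
-- ===== SOURCE A (Python) =====
-- DIRECTION_TO_MOVEMENT = {"u": (-1, 0),   # one row up
--                          "d": (1, 0),    # one row down
--                          "r": (0, 1),    # one column right
--                          "l": (0, -1),   # one column left
--                          "w": (-1, 1),   # one row down, one column right
--                          "x": (-1, -1),  # one row up, one column left
--                          "y": (1, 1),    # one row down, one column right
--                          "z": (1, -1)}   # one row down, one column left
--
-- def does_len_match_index(word_len, num_rows, num_cols, row, col, direction):
--     """a function that checks if match is possible considering the word's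
--     length only. if it's outside the matrix - the word would surely
--     not match """
--     # these two next lines calculate the row and column of last letter,
--     #  by using the initial row and column, the direction movement,
--     #  and the length
--     last_letter_row = row + DIRECTION_TO_MOVEMENT[direction][0]*(word_len-1)
--     last_letter_col = col + DIRECTION_TO_MOVEMENT[direction][1]*(word_len-1)
--     if last_letter_row >= num_rows or last_letter_row < 0:
--         return False
--     if last_letter_col >= num_cols or last_letter_col < 0:
--         return False
--     return True
--
-- def does_word_match_index(word, matrix, row, col, direction):
--     """a function that gets a word, matrix of letters, row index, column index
--     and a search direction, and checks whether the word matches that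
--     index in the matrix"""
--     #  this next line makes sure we are not outside the matrix
--     if not does_len_match_index(len(word), len(matrix), len(matrix[0]), row,
--                                 col, direction):
--         return False
--     for letter in word:
--         if letter != matrix[row][col]:  # word doesn't match
--             return False
--         # these two next lines move index in the matrix to the next position,
--         #  according to direction
--         row = row + DIRECTION_TO_MOVEMENT[direction][0]
--         col = col + DIRECTION_TO_MOVEMENT[direction][1]
--     return True
--
-- def update_dict_with_word(word, word_to_occurrences):
--     """a function that gets a word and a current dictionary of word
--     to occurrences, and adds the word to the dictionary if it does
--     not exist, or adds 1 to the occurrences if it exists"""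
--     if word not in word_to_occurrences:
--         word_to_occurrences[word] = 1
--     else:
--         word_to_occurrences[word] += 1
--     return True  # we don't actually need to return value
--
-- def build_letter_to_indices(matrix):
--     """a function that gets matrix of letters and returns a dictionary:
--      key = letter, value = list of row,column in which the letter appears"""
--     letter_to_indices = {}
--     for row in range(len(matrix)):
--         for col in range(len(matrix[0])):
--             letter = matrix[row][col]
--             if letter not in letter_to_indices:
--                 # add the letter to the dictionary, with empty list
--                 letter_to_indices[letter] = []
--             # add the index to the letter's list
--             letter_to_indices[letter].append((row, col))
--     return letter_to_indices
--
-- def find_words_in_matrix(word_list, matrix, directions):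
--     """a function that gets list of words, letters matrix,
--     and string of search direction/s, and returns list of tuple that contains
--     each word that appeared in the matrix, and how many times it appeared"""
--     word_to_occurrences = {}
--     letter_to_indices = build_letter_to_indices(matrix)
--     # traverse the words, the first letter indices, and directions,
--     #  and check match
--     for word in word_list:
--         if word[0] not in letter_to_indices:  # if first letter not in matrix,
--             #  no need to check the word
--             continue
--         indices = letter_to_indices[word[0]]  # list of all the positions
--         #  of the letter in the matrix (first letter in word)
--         for pos in indices:
--             for direction in directions:
--                 if does_word_match_index(word, matrix, pos[0], pos[1],
--                                          direction):
--                     update_dict_with_word(word, word_to_occurrences)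
--     return list(word_to_occurrences.items())  # convert dictionary
-- ===== SOURCE B (Python) =====
-- MOVES = {"u": (-1, 0), "d": (1, 0), "r": (0, 1), "l": (0, -1),
--          "w": (-1, 1), "x": (-1, -1), "y": (1, 1), "z": (1, -1)}
--
-- def find_words_in_matrix(word_list, matrix, directions):
--     """Count each distinct word once over all cells and directions and
--     multiply by its multiplicity in word_list, instead of re-scanning the
--     matrix per duplicate word and accumulating a dictionary per match."""
--     num_rows = len(matrix)
--     num_cols = len(matrix[0]) if matrix else 0
--
--     def ray_matches(word, r, c, dr, dc):
--         # walk the ray letter by letter, bounds-checked at every step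
--         for letter in word:
--             if r < 0 or r >= num_rows or c < 0 or c >= num_cols:
--                 return False
--             if matrix[r][c] != letter:
--                 return False
--             r += dr
--             c += dc
--         return True
--
--     # multiplicity of each word and first-occurrence order
--     mult = {}
--     order = []
--     for w in word_list:
--         if w in mult:
--             mult[w] += 1
--         else:
--             mult[w] = 1
--             order.append(w)
--
--     result = []
--     for w in order:
--         first = w[0]
--         m = 0
--         for r in range(num_rows):
--             for c in range(num_cols):
--                 if matrix[r][c] != first:
--                     continue  # a ray can only start on the first letter
--                 for d in directions:
--                     dr, dc = MOVES[d]
--                     if ray_matches(w, r, c, dr, dc):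
--                         m += 1
--         if m:
--             result.append((w, mult[w] * m))
--     return result
-- ===== Notes on version B (the rewrite author's own statement) =====
-- stated objective: alternative
-- what changed: B counts matches once per distinct word over the cells (skipping cells whose letter is not the word's first letter) and multiplies by the word's multiplicity, instead of A's per-occurrence re-scan that accumulates a word->occurrences dictionary through a letter->positions index; B's ray check walks with per-step bounds tests instead of A's separate endpoint pre-check.
import Mathlib
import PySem

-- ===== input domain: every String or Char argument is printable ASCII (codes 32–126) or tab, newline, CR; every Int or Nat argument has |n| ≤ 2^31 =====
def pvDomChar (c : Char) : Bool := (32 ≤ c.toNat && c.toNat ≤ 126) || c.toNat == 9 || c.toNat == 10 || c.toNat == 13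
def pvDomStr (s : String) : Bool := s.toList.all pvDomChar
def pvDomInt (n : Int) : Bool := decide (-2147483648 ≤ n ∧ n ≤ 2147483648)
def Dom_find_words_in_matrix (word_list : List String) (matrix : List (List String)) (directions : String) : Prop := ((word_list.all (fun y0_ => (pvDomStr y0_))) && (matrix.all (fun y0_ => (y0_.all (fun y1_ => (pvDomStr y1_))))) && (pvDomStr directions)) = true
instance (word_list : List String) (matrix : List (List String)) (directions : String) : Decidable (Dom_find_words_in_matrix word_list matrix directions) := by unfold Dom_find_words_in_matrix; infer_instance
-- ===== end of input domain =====

-- B counts each distinct word once over all cells/directions and multiplies by its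
-- multiplicity, instead of A's per-occurrence dictionary accumulation over a
-- letter→positions index; equivalence is proved on all inputs where A returns.

-- ===== PORT A =====
-- DIRECTION_TO_MOVEMENT: the literal dict; none exactly where Python raises KeyError
def pvDirMove : Char → Option (Int × Int)
  | 'u' => some (-1, 0)
  | 'd' => some (1, 0)
  | 'r' => some (0, 1)
  | 'l' => some (0, -1)
  | 'w' => some (-1, 1)
  | 'x' => some (-1, -1)
  | 'y' => some (1, 1)
  | 'z' => some (1, -1)
  | _   => none

-- matrix[row][col]; exact whenever 0 ≤ row < len(matrix) and 0 ≤ col < len(matrix[row]),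
-- which holds at every evaluation under Pre_ (both ports index only inside these bounds)
def pvCell (matrix : List (List String)) (row col : Int) : String :=
  PySem.List.pyGetD (PySem.List.pyGetD matrix row []) col ""

def does_len_match_index (word_len num_rows num_cols row col : Int) (direction : Char) : Bool :=
  match pvDirMove direction with
  | none => false   -- Python: KeyError; unreachable under Pre_
  | some (dr, dc) =>
    let last_letter_row := row + dr * (word_len - 1)
    let last_letter_col := col + dc * (word_len - 1)
    if last_letter_row ≥ num_rows || last_letter_row < 0 then false
    else if last_letter_col ≥ num_cols || last_letter_col < 0 then false
    else true

-- the `for letter in word` loop of does_word_match_index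
def pvMatchLoop (matrix : List (List String)) (dr dc : Int) : List Char → Int → Int → Bool
  | [], _, _ => true
  | letter :: rest, row, col =>
    if String.ofList [letter] ≠ pvCell matrix row col then false
    else pvMatchLoop matrix dr dc rest (row + dr) (col + dc)

def does_word_match_index (word : String) (matrix : List (List String)) (row col : Int) (direction : Char) : Bool :=
  -- len(matrix[0]): matrix is nonempty at every call site (row/col come from the index)
  if ¬ does_len_match_index (word.toList.length : Int) (matrix.length : Int)
      ((matrix.headD []).length : Int) row col direction then false
  else
    match pvDirMove direction with
    | none => false   -- Python: KeyError; unreachable under Pre_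
    | some (dr, dc) => pvMatchLoop matrix dr dc word.toList row col

def update_dict_with_word (word : String) (d : PySem.Dict String Int) : PySem.Dict String Int :=
  if d.contains word = false then d.insert word 1 else d.modify word 0 (· + 1)

def build_letter_to_indices (matrix : List (List String)) : PySem.Dict String (List (Int × Int)) :=
  (List.range matrix.length).foldl (fun d (row : Nat) =>
    (List.range (matrix.headD []).length).foldl (fun d (col : Nat) =>
      let letter := pvCell matrix (row : Int) (col : Int)
      let d := if d.contains letter then d else d.insert letter []      -- dict[letter] = []
      d.modify letter [] (· ++ [((row : Int), (col : Int))]))           -- dict[letter].append((row, col))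
      d) PySem.Dict.empty

def find_words_in_matrix (word_list : List String) (matrix : List (List String)) (directions : String) : List (String × Int) :=
  let letter_to_indices := build_letter_to_indices matrix
  let word_to_occurrences : PySem.Dict String Int :=
    word_list.foldl (fun d word =>
      match word.toList with
      | [] => d   -- Python: word[0] raises IndexError; unreachable under Pre_
      | first :: _ =>
        match letter_to_indices.get? (String.ofList [first]) with
        | none => d   -- continue
        | some indices =>
          indices.foldl (fun d pos =>
            directions.toList.foldl (fun d direction =>
              if does_word_match_index word matrix pos.1 pos.2 direction
              then update_dict_with_word word d
              else d) d) d) PySem.Dict.empty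
  word_to_occurrences.items

-- ===== PORT B =====
-- ray_matches: walk the ray letter by letter, bounds-checked at every step
def pvRayMatches (matrix : List (List String)) (numRows numCols : Int) : List Char → Int → Int → Int → Int → Bool
  | [], _, _, _, _ => true
  | letter :: rest, r, c, dr, dc =>
    if r < 0 || r ≥ numRows || c < 0 || c ≥ numCols then false
    else if pvCell matrix r c ≠ String.ofList [letter] then false
    else pvRayMatches matrix numRows numCols rest (r + dr) (c + dc) dr dc

def find_words_in_matrix_alt (word_list : List String) (matrix : List (List String)) (directions : String) : List (String × Int) :=
  let numRows : Nat := matrix.length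
  let numCols : Nat := match matrix with | [] => 0 | row0 :: _ => row0.length
  -- multiplicity of each word and first-occurrence order
  let st := word_list.foldl (fun (st : PySem.Dict String Int × List String) w =>
    if st.1.contains w then (st.1.modify w 0 (· + 1), st.2)
    else (st.1.insert w 1, st.2 ++ [w])) (PySem.Dict.empty, [])
  st.2.foldl (fun result w =>
    match w.toList with
    | [] => result   -- Python: w[0] raises IndexError; unreachable under Pre_
    | first :: _ =>
      let m : Int := (List.range numRows).foldl (fun m (r : Nat) =>
        (List.range numCols).foldl (fun m (c : Nat) =>
          if pvCell matrix (r : Int) (c : Int) ≠ String.ofList [first] then m   -- continue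
          else directions.toList.foldl (fun m d =>
            match pvDirMove d with
            | none => m   -- Python: KeyError; unreachable under Pre_
            | some (dr, dc) =>
              if pvRayMatches matrix (numRows : Int) (numCols : Int) w.toList (r : Int) (c : Int) dr dc
              then m + 1 else m) m) m) 0
      if m ≠ 0 then result ++ [(w, st.1.getD w 0 * m)] else result) []

-- ===== PRECONDITION & SPEC =====
-- Pre_ excludes exactly the inputs where A raises: an empty word (IndexError on word[0]),
-- a row shorter than row 0 (IndexError in build_letter_to_indices), or an invalid
-- direction character while some word's first letter occurs in the matrix (KeyError).
def pvValidDir (c : Char) : Bool :=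
  c == 'u' || c == 'd' || c == 'r' || c == 'l' || c == 'w' || c == 'x' || c == 'y' || c == 'z'

def Pre_find_words_in_matrix (word_list : List String) (matrix : List (List String)) (directions : String) : Prop :=
  (∀ w ∈ word_list, w ≠ "") ∧
  (∀ row ∈ matrix, (matrix.headD []).length ≤ row.length) ∧
  (directions.toList.all pvValidDir = true ∨
   (∀ w ∈ word_list, ∀ row ∈ matrix, String.ofList (w.toList.take 1) ∉ row.take (matrix.headD []).length))
instance (word_list : List String) (matrix : List (List String)) (directions : String) : Decidable (Pre_find_words_in_matrix word_list matrix directions) := by unfold Pre_find_words_in_matrix; infer_instance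

def pvWitness_find_words_in_matrix : List String × List (List String) × String :=
  (["ab", "b", "ab"], [["a", "b"], ["b", "a"]], "rd")

def Spec_find_words_in_matrix (word_list : List String) (matrix : List (List String)) (directions : String) (out : List (String × Int)) : Prop := out = find_words_in_matrix_alt word_list matrix directions
instance (word_list : List String) (matrix : List (List String)) (directions : String) (out : List (String × Int)) : Decidable (Spec_find_words_in_matrix word_list matrix directions out) := by unfold Spec_find_words_in_matrix; infer_instance

-- ===== CLAIM (what is proved, stated in full; the proofs are below) =====
def Claim_equal_find_words_in_matrix : Prop := ∀ (word_list : List String) (matrix : List (List String)) (directions : String), Dom_find_words_in_matrix word_list matrix directions → Pre_find_words_in_matrix word_list matrix directions → Spec_find_words_in_matrix word_list matrix directions (find_words_in_matrix word_list matrix directions)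

-- ===== LEMMAS AND PROOFS =====

-- proof-side abbreviations
def pvNC (matrix : List (List String)) : Nat := (matrix.headD []).length

def pvCells (matrix : List (List String)) : List (Int × Int) :=
  (List.range matrix.length).flatMap
    (fun (r : Nat) => (List.range (pvNC matrix)).map (fun (c : Nat) => ((r : Int), (c : Int))))

-- per-cell number of direction hits of A's matcher, and the total over the matrix
def pvCnt (matrix : List (List String)) (dsL : List Char) (w : String) (r c : Nat) : Nat :=
  dsL.countP (fun dch => does_word_match_index w matrix (r : Int) (c : Int) dch)

def pvK (matrix : List (List String)) (dsL : List Char) (w : String) : Nat :=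
  ((List.range matrix.length).map (fun r =>
    ((List.range (pvNC matrix)).map (fun c => pvCnt matrix dsL w r c)).sum)).sum

-- movement entries are unit steps
theorem pvDirMove_bounds (dch : Char) (dr dc : Int) (h : pvDirMove dch = some (dr, dc)) :
    -1 ≤ dr ∧ dr ≤ 1 ∧ -1 ≤ dc ∧ dc ≤ 1 := by
  unfold pvDirMove at h
  split at h <;> simp_all <;> omega

-- A's matcher is false when the direction character is invalid
theorem pv_Amatch_invalid (w : String) (M : List (List String)) (r c : Int) (dch : Char)
    (h : pvDirMove dch = none) : does_word_match_index w M r c dch = false := by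
  unfold does_word_match_index does_len_match_index
  rw [h]
  simp

-- A's matcher is false when the start cell is not the word's first letter
theorem pv_Amatch_first (w : String) (M : List (List String)) (r c : Int) (dch : Char)
    (f : Char) (rest : List Char) (hw : w.toList = f :: rest)
    (hne : pvCell M r c ≠ String.ofList [f]) :
    does_word_match_index w M r c dch = false := by
  unfold does_word_match_index
  split
  · rfl
  · rw [hw]
    cases hmv : pvDirMove dch with
    | none => rfl
    | some p =>
      obtain ⟨dr, dc⟩ := p
      dsimp only
      unfold pvMatchLoop
      rw [if_pos (Ne.symm hne)]

-- B's ray matcher is false when the last letter's cell is out of bounds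
theorem pv_ray_oob (M : List (List String)) (nR nC dr dc : Int) :
    ∀ (w : List Char), w ≠ [] → ∀ r c : Int,
      (r + dr * ((w.length : Int) - 1) < 0 ∨ r + dr * ((w.length : Int) - 1) ≥ nR ∨
       c + dc * ((w.length : Int) - 1) < 0 ∨ c + dc * ((w.length : Int) - 1) ≥ nC) →
      pvRayMatches M nR nC w r c dr dc = false := by
  intro w
  induction w with
  | nil => intro h; exact absurd rfl h
  | cons a rest ih =>
    intro _ r c hoob
    unfold pvRayMatches
    cases rest with
    | nil =>
      simp only [List.length_cons, List.length_nil] at hoob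
      push_cast at hoob
      split
      · rfl
      · next hb =>
        exfalso
        simp only [Bool.or_eq_true, decide_eq_true_eq, not_or] at hb
        omega
    | cons b rest' =>
      split
      · rfl
      · split
        · rfl
        · apply ih (by simp) (r + dr) (c + dc)
          have harr : (r + dr) + dr * (((b :: rest').length : Int) - 1)
              = r + dr * (((a :: b :: rest').length : Int) - 1) := by
            simp only [List.length_cons]
            push_cast
            ring
          have hacc : (c + dc) + dc * (((b :: rest').length : Int) - 1)
              = c + dc * (((a :: b :: rest').length : Int) - 1) := by
            simp only [List.length_cons]
            push_cast
            ring
          rw [harr, hacc]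
          exact hoob

-- in-bounds ray with in-bounds endpoint walks exactly like A's letter loop
theorem pv_ray_eq_loop (M : List (List String)) (nR nC dr dc : Int)
    (hdr : -1 ≤ dr ∧ dr ≤ 1) (hdc : -1 ≤ dc ∧ dc ≤ 1) :
    ∀ (w : List Char) (r c : Int), 0 ≤ r → r < nR → 0 ≤ c → c < nC →
      (0 ≤ r + dr * ((w.length : Int) - 1) ∧ r + dr * ((w.length : Int) - 1) < nR ∧
       0 ≤ c + dc * ((w.length : Int) - 1) ∧ c + dc * ((w.length : Int) - 1) < nC) →
      pvRayMatches M nR nC w r c dr dc = pvMatchLoop M dr dc w r c := by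
  intro w
  induction w with
  | nil => intro r c _ _ _ _ _; rfl
  | cons a rest ih =>
    intro r c h1 h2 h3 h4 hend
    unfold pvRayMatches pvMatchLoop
    rw [if_neg (by simp only [Bool.or_eq_true, decide_eq_true_eq, not_or]; omega)]
    by_cases hcell : pvCell M r c = String.ofList [a]
    · rw [if_neg (fun h => h hcell), if_neg (fun h => h (Eq.symm hcell))]
      cases rest with
      | nil => rfl
      | cons b rest' =>
        apply ih (r + dr) (c + dc)
        · obtain ⟨hdr1, hdr2⟩ := hdr
          have h5 : dr = -1 ∨ dr = 0 ∨ dr = 1 := by omega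
          obtain ⟨e1, _, _, _⟩ := hend
          simp only [List.length_cons] at e1
          push_cast at e1
          rcases h5 with h5 | h5 | h5 <;> subst h5 <;> [skip; skip; skip] <;>
            simp only [neg_one_mul, one_mul, zero_mul, add_zero] at e1 ⊢ <;> omega
        · obtain ⟨hdr1, hdr2⟩ := hdr
          have h5 : dr = -1 ∨ dr = 0 ∨ dr = 1 := by omega
          obtain ⟨_, e2, _, _⟩ := hend
          simp only [List.length_cons] at e2
          push_cast at e2
          rcases h5 with h5 | h5 | h5 <;> subst h5 <;>
            simp only [neg_one_mul, one_mul, zero_mul, add_zero] at e2 ⊢ <;> omega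
        · obtain ⟨hdc1, hdc2⟩ := hdc
          have h5 : dc = -1 ∨ dc = 0 ∨ dc = 1 := by omega
          obtain ⟨_, _, e3, _⟩ := hend
          simp only [List.length_cons] at e3
          push_cast at e3
          rcases h5 with h5 | h5 | h5 <;> subst h5 <;>
            simp only [neg_one_mul, one_mul, zero_mul, add_zero] at e3 ⊢ <;> omega
        · obtain ⟨hdc1, hdc2⟩ := hdc
          have h5 : dc = -1 ∨ dc = 0 ∨ dc = 1 := by omega
          obtain ⟨_, _, _, e4⟩ := hend
          simp only [List.length_cons] at e4
          push_cast at e4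
          rcases h5 with h5 | h5 | h5 <;> subst h5 <;>
            simp only [neg_one_mul, one_mul, zero_mul, add_zero] at e4 ⊢ <;> omega
        · constructor
          · have harr : (r + dr) + dr * (((b :: rest').length : Int) - 1)
                = r + dr * (((a :: b :: rest').length : Int) - 1) := by
              simp only [List.length_cons]; push_cast; ring
            rw [harr]; exact hend.1
          constructor
          · have harr : (r + dr) + dr * (((b :: rest').length : Int) - 1)
                = r + dr * (((a :: b :: rest').length : Int) - 1) := by
              simp only [List.length_cons]; push_cast; ring
            rw [harr]; exact hend.2.1
          constructor
          · have hacc : (c + dc) + dc * (((b :: rest').length : Int) - 1)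
                = c + dc * (((a :: b :: rest').length : Int) - 1) := by
              simp only [List.length_cons]; push_cast; ring
            rw [hacc]; exact hend.2.2.1
          · have hacc : (c + dc) + dc * (((b :: rest').length : Int) - 1)
                = c + dc * (((a :: b :: rest').length : Int) - 1) := by
              simp only [List.length_cons]; push_cast; ring
            rw [hacc]; exact hend.2.2.2
    · rw [if_pos hcell, if_pos (fun h => hcell (Eq.symm h))]


-- the length pre-check states exactly that the last letter is in bounds
theorem pv_len_iff (n nR nC r c : Int) (dch : Char) (dr dc : Int)
    (hmv : pvDirMove dch = some (dr, dc)) :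
    does_len_match_index n nR nC r c dch = true ↔
      (0 ≤ r + dr * (n - 1) ∧ r + dr * (n - 1) < nR ∧
       0 ≤ c + dc * (n - 1) ∧ c + dc * (n - 1) < nC) := by
  unfold does_len_match_index
  rw [hmv]
  dsimp only
  split_ifs with h1 h2
  · simp only [Bool.or_eq_true, decide_eq_true_eq, ge_iff_le] at h1
    exact iff_of_false (by simp) (by omega)
  · simp only [Bool.or_eq_true, decide_eq_true_eq, ge_iff_le] at h2
    exact iff_of_false (by simp) (by omega)
  · simp only [Bool.or_eq_true, decide_eq_true_eq, ge_iff_le, not_or, not_le, not_lt] at h1 h2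
    exact iff_of_true rfl (by omega)

-- A's matcher agrees with B's ray matcher at in-bounds cells for valid directions
theorem pv_Amatch_eq_ray (w : String) (M : List (List String)) (r c : Nat)
    (dch : Char) (dr dc : Int) (hw : w.toList ≠ []) (hmv : pvDirMove dch = some (dr, dc))
    (hr : r < M.length) (hc : c < pvNC M) :
    does_word_match_index w M (r : Int) (c : Int) dch
      = pvRayMatches M (M.length : Int) (pvNC M : Int) w.toList (r : Int) (c : Int) dr dc := by
  obtain ⟨hdr1, hdr2, hdc1, hdc2⟩ := pvDirMove_bounds dch dr dc hmv
  cases hL : does_len_match_index (w.toList.length : Int) (M.length : Int)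
      ((M.headD []).length : Int) (r : Int) (c : Int) dch with
  | true =>
    have hend := (pv_len_iff (w.toList.length : Int) (M.length : Int) ((M.headD []).length : Int)
      (r : Int) (c : Int) dch dr dc hmv).mp hL
    unfold does_word_match_index
    rw [hL, if_neg (by simp), hmv]
    dsimp only
    exact (pv_ray_eq_loop M (M.length : Int) (pvNC M : Int) dr dc ⟨hdr1, hdr2⟩ ⟨hdc1, hdc2⟩
      w.toList (r : Int) (c : Int) (by positivity) (by exact_mod_cast hr)
      (by positivity) (by exact_mod_cast hc) hend).symm
  | false =>
    have hoob : ¬ (0 ≤ (r : Int) + dr * ((w.toList.length : Int) - 1) ∧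
        (r : Int) + dr * ((w.toList.length : Int) - 1) < (M.length : Int) ∧
        0 ≤ (c : Int) + dc * ((w.toList.length : Int) - 1) ∧
        (c : Int) + dc * ((w.toList.length : Int) - 1) < ((M.headD []).length : Int)) := by
      intro hcj
      rw [(pv_len_iff (w.toList.length : Int) (M.length : Int) ((M.headD []).length : Int)
        (r : Int) (c : Int) dch dr dc hmv).mpr hcj] at hL
      cases hL
    unfold does_word_match_index
    rw [hL, if_pos (by simp)]
    exact (pv_ray_oob M (M.length : Int) (pvNC M : Int) dr dc w.toList hw (r : Int) (c : Int)
      (by unfold pvNC; omega)).symm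

-- B's per-cell contribution (prefilter + per-direction ray count) is A's per-cell hit count
theorem pv_cnt_eq (M : List (List String)) (dsL : List Char) (w : String) (f : Char)
    (rest : List Char) (hw : w.toList = f :: rest) (r c : Nat)
    (hr : r < M.length) (hc : c < pvNC M) :
    (if pvCell M (r : Int) (c : Int) ≠ String.ofList [f] then 0 else
      dsL.countP (fun dch => match pvDirMove dch with
        | none => false
        | some (dr, dc) =>
          pvRayMatches M (M.length : Int) (pvNC M : Int) w.toList (r : Int) (c : Int) dr dc))
      = pvCnt M dsL w r c := by
  unfold pvCnt
  by_cases hcell : pvCell M (r : Int) (c : Int) = String.ofList [f]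
  · rw [if_neg (fun h => h hcell)]
    apply List.countP_congr
    intro dch _
    cases hmv : pvDirMove dch with
    | none => rw [pv_Amatch_invalid w M (r : Int) (c : Int) dch hmv]
    | some p =>
      obtain ⟨dr, dc⟩ := p
      dsimp only
      rw [pv_Amatch_eq_ray w M r c dch dr dc (by rw [hw]; simp) hmv hr hc]
  · rw [if_pos hcell]
    symm
    rw [List.countP_eq_zero]
    intro dch _
    rw [pv_Amatch_first w M (r : Int) (c : Int) dch f rest hw hcell]
    simp

-- the ensure-key-then-append step of build_letter_to_indices is a plain modify
theorem pv_step_eq (d : PySem.Dict String (List (Int × Int))) (letter : String) (p : Int × Int) :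
    ((if d.contains letter then d else d.insert letter []).modify letter [] (· ++ [p]))
      = d.modify letter [] (· ++ [p]) := by
  by_cases h : d.contains letter = true
  · rw [if_pos h]
  · have h' : d.contains letter = false := by simpa using h
    rw [if_neg (by simp [h'])]
    show (d.insert letter []).insert letter (((d.insert letter []).getD letter []) ++ [p])
        = d.insert letter ((d.getD letter []) ++ [p])
    rw [PySem.Dict.getD_insert_self, PySem.Dict.insert_insert_self,
      PySem.Dict.getD_of_not_contains d [] h']

def pvPairs (M : List (List String)) : List (String × (Int × Int)) :=
  (pvCells M).map (fun p => (pvCell M p.1 p.2, p))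

theorem pv_build_eq (M : List (List String)) :
    build_letter_to_indices M
      = (pvPairs M).foldl (fun d q => d.modify q.1 [] (· ++ [q.2])) PySem.Dict.empty := by
  unfold build_letter_to_indices pvPairs pvCells
  rw [List.foldl_map, List.foldl_flatMap]
  simp only [List.foldl_map]
  apply PySem.List.foldl_congr_mem
  intro acc row _
  apply PySem.List.foldl_congr_mem
  intro acc2 col _
  dsimp only
  exact pv_step_eq acc2 (pvCell M (row : Int) (col : Int)) ((row : Int), (col : Int))

theorem pv_getD_build (M : List (List String)) (s : String) :
    (build_letter_to_indices M).getD s []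
      = (pvCells M).filter (fun p => pvCell M p.1 p.2 == s) := by
  rw [pv_build_eq, PySem.Dict.getD_foldl_modify_append]
  unfold pvPairs
  rw [List.filter_map, List.map_map]
  simp [Function.comp_def]

theorem pv_keys_build (M : List (List String)) :
    (build_letter_to_indices M).keys
      = PySem.Set.ofList ((pvCells M).map (fun p => pvCell M p.1 p.2)) := by
  rw [pv_build_eq,
    PySem.Dict.keys_foldl_modify_key (pvPairs M) Prod.fst [] (fun _ q => (· ++ [q.2]))]
  unfold pvPairs
  rw [List.map_map]
  rfl

theorem pv_contains_build (M : List (List String)) (s : String) :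
    (build_letter_to_indices M).contains s = true ↔ ∃ p ∈ pvCells M, pvCell M p.1 p.2 = s := by
  rw [PySem.Dict.contains_iff_mem_keys, pv_keys_build, PySem.Set.mem_ofList]
  simp [List.mem_map]

-- loop shapes
theorem pv_foldl_upd_count {α : Type} (w : String) (P : α → Bool) (l : List α)
    (d : PySem.Dict String Int) :
    l.foldl (fun d x => if P x then update_dict_with_word w d else d) d
      = (update_dict_with_word w)^[l.countP P] d := by
  induction l generalizing d with
  | nil => rfl
  | cons a l ih =>
    rw [List.foldl_cons, List.countP_cons]
    by_cases h : P a = true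
    · rw [if_pos h, ih, h]
      norm_num [Function.iterate_succ_apply]
    · have h' : P a = false := by simpa using h
      rw [if_neg (by simp [h']), h', ih]
      rfl

theorem pv_foldl_iterate_sum {α : Type} (w : String) (g : α → Nat) (l : List α)
    (d : PySem.Dict String Int) :
    l.foldl (fun d x => (update_dict_with_word w)^[g x] d) d
      = (update_dict_with_word w)^[(l.map g).sum] d := by
  induction l generalizing d with
  | nil => rfl
  | cons a l ih =>
    rw [List.foldl_cons, ih, List.map_cons, List.sum_cons, Nat.add_comm,
      Function.iterate_add_apply]

theorem pv_sum_filter_zero {α : Type} (l : List α) (P : α → Bool) (g : α → Nat)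
    (h : ∀ x ∈ l, P x = false → g x = 0) :
    ((l.filter P).map g).sum = (l.map g).sum := by
  induction l with
  | nil => rfl
  | cons a l ih =>
    rw [List.filter_cons]
    by_cases ha : P a = true
    · rw [if_pos ha, List.map_cons, List.sum_cons, List.map_cons, List.sum_cons,
        ih (fun x hx => h x (List.mem_cons_of_mem a hx))]
    · have ha' : P a = false := by simpa using ha
      rw [if_neg (by simp [ha']), List.map_cons, List.sum_cons,
        ih (fun x hx => h x (List.mem_cons_of_mem a hx)), h a (List.mem_cons_self) ha',
        Nat.zero_add]

theorem pv_sum_flatMap {α : Type} (l : List α) (f : α → List Nat) :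
    (l.flatMap f).sum = (l.map (fun a => (f a).sum)).sum := by
  induction l with
  | nil => rfl
  | cons a l ih => simp [List.flatMap_cons, ih]

theorem pv_sum_cells (M : List (List String)) (g : Int × Int → Nat) :
    ((pvCells M).map g).sum
      = ((List.range M.length).map (fun (r : Nat) =>
          ((List.range (pvNC M)).map (fun (c : Nat) => g ((r : Int), (c : Int)))).sum)).sum := by
  unfold pvCells
  rw [List.map_flatMap, pv_sum_flatMap]
  simp [List.map_map, Function.comp_def]

-- processing one word of A's main loop applies the counting update pvK-many times
theorem pv_word_step (M : List (List String)) (dsL : List Char) (w : String) (f : Char)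
    (rest : List Char) (hw : w.toList = f :: rest) (d : PySem.Dict String Int) :
    (match (build_letter_to_indices M).get? (String.ofList [f]) with
      | none => d
      | some indices =>
        indices.foldl (fun d pos =>
          dsL.foldl (fun d direction =>
            if does_word_match_index w M pos.1 pos.2 direction
            then update_dict_with_word w d else d) d) d)
      = (update_dict_with_word w)^[pvK M dsL w] d := by
  cases hcon : (build_letter_to_indices M).contains (String.ofList [f]) with
  | false =>
    rw [(PySem.Dict.get?_eq_none_iff_contains _ _).mpr hcon]
    have hK : pvK M dsL w = 0 := by
      unfold pvK
      apply List.sum_eq_zero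
      intro x hx
      simp only [List.mem_map, List.mem_range] at hx
      obtain ⟨r, hr, rfl⟩ := hx
      apply List.sum_eq_zero
      intro y hy
      simp only [List.mem_map, List.mem_range] at hy
      obtain ⟨c, hc, rfl⟩ := hy
      unfold pvCnt
      rw [List.countP_eq_zero]
      intro dch _
      have hcell : pvCell M (r : Int) (c : Int) ≠ String.ofList [f] := by
        intro he
        have hmem : ∃ p ∈ pvCells M, pvCell M p.1 p.2 = String.ofList [f] := by
          refine ⟨((r : Int), (c : Int)), ?_, he⟩
          unfold pvCells
          exact List.mem_flatMap.mpr ⟨r, List.mem_range.mpr hr,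
            List.mem_map.mpr ⟨c, List.mem_range.mpr hc, rfl⟩⟩
        rw [← pv_contains_build] at hmem
        rw [hmem] at hcon
        cases hcon
      rw [pv_Amatch_first w M (r : Int) (c : Int) dch f rest hw hcell]
      simp
    rw [hK]
    rfl
  | true =>
    have hsome : (build_letter_to_indices M).get? (String.ofList [f])
        = some ((build_letter_to_indices M).getD (String.ofList [f]) []) := by
      cases hg : (build_letter_to_indices M).get? (String.ofList [f]) with
      | none =>
        rw [PySem.Dict.get?_eq_none_iff_contains] at hg
        rw [hg] at hcon
        cases hcon
      | some v => rw [PySem.Dict.getD_of_get?_eq_some _ _ hg]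
    rw [hsome, pv_getD_build]
    dsimp only
    rw [show (List.filter (fun p => pvCell M p.1 p.2 == String.ofList [f]) (pvCells M)).foldl
        (fun d pos => dsL.foldl (fun d direction =>
          if does_word_match_index w M pos.1 pos.2 direction
          then update_dict_with_word w d else d) d) d
      = (List.filter (fun p => pvCell M p.1 p.2 == String.ofList [f]) (pvCells M)).foldl
        (fun d pos => (update_dict_with_word w)^[dsL.countP
          (fun dch => does_word_match_index w M pos.1 pos.2 dch)] d) d
      from PySem.List.foldl_congr_mem _ _ _ _ (fun acc pos _ => pv_foldl_upd_count w _ dsL acc)]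
    rw [pv_foldl_iterate_sum w
      (fun pos : Int × Int => dsL.countP (fun dch => does_word_match_index w M pos.1 pos.2 dch))
      (List.filter (fun p => pvCell M p.1 p.2 == String.ofList [f]) (pvCells M)) d]
    congr 1
    rw [pv_sum_filter_zero _ _ _ ?hz]
    case hz =>
      intro p hp hpf
      rw [List.countP_eq_zero]
      intro dch _
      have hcell : pvCell M p.1 p.2 ≠ String.ofList [f] := by
        intro he
        rw [he] at hpf
        simp at hpf
      rw [pv_Amatch_first w M p.1 p.2 dch f rest hw hcell]
      simp
    rw [pv_sum_cells M (fun p => dsL.countP (fun dch => does_word_match_index w M p.1 p.2 dch))]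
    rfl

-- membership in items gives contains
theorem pv_contains_of_mem_items (d : PySem.Dict String Int) (w : String) (v : Int)
    (h : (w, v) ∈ d.items) : d.contains w = true := by
  unfold PySem.Dict.contains
  rw [List.any_eq_true]
  exact ⟨(w, v), h, by simp⟩

-- bumping one key's value does not change the key list
theorem pv_keys_bump (items : List (String × Int)) (w : String) (x : Int) :
    (List.map (fun p => if p.1 == w then (w, x) else p) items).map Prod.fst
      = items.map Prod.fst := by
  rw [List.map_map]
  apply List.map_congr_left
  intro p _
  by_cases h : p.1 = w
  · simp [h]
  · simp [h]

-- t updates on a present key bump its value by t in place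
theorem pv_items_updN_mem (w : String) (t : Nat) :
    ∀ (d : PySem.Dict String Int) (v : Int), d.keys.Nodup → (w, v) ∈ d.items →
    ((update_dict_with_word w)^[t] d).items
      = d.items.map (fun p => if p.1 == w then (w, v + (t : Int)) else p) := by
  induction t with
  | zero =>
    intro d v hnd hmem
    simp only [Function.iterate_zero_apply, Nat.cast_zero, add_zero]
    have hcg : ∀ p ∈ d.items, (if (p.1 == w) = true then (w, v) else p) = p := by
      intro p hp
      by_cases hb : p.1 = w
      · have h2 : d.getD w 0 = v := PySem.Dict.getD_of_mem_items d hmem hnd 0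
        have h3 : d.getD w 0 = p.2 := by
          refine PySem.Dict.getD_of_mem_items d ?_ hnd 0
          have hpp : p = (p.1, p.2) := rfl
          rw [hpp, hb] at hp
          exact hp
        have hp2 : p = (w, v) := by
          have hv : p.2 = v := by rw [← h3, h2]
          rw [Prod.ext_iff]
          exact ⟨hb, hv⟩
        simp [hp2]
      · simp [hb]
    rw [List.map_congr_left hcg, List.map_id']
  | succ t ih =>
    intro d v hnd hmem
    rw [Function.iterate_succ_apply']
    have hd' := ih d v hnd hmem
    have hmem' : (w, v + (t : Int)) ∈ ((update_dict_with_word w)^[t] d).items := by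
      rw [hd']
      exact List.mem_map.mpr ⟨(w, v), hmem, by simp⟩
    have hcon' := pv_contains_of_mem_items _ w _ hmem'
    have hnd' : ((update_dict_with_word w)^[t] d).keys.Nodup := by
      show (((update_dict_with_word w)^[t] d).items.map Prod.fst).Nodup
      rw [hd', pv_keys_bump]
      exact hnd
    have hstep : update_dict_with_word w ((update_dict_with_word w)^[t] d)
        = ((update_dict_with_word w)^[t] d).modify w 0 (· + 1) := by
      rw [update_dict_with_word, if_neg (by simp [hcon'])]
    rw [hstep]
    show (((update_dict_with_word w)^[t] d).insert w
        (((update_dict_with_word w)^[t] d).getD w 0 + 1)).items = _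
    rw [PySem.Dict.getD_of_mem_items _ hmem' hnd' 0,
      PySem.Dict.items_insert_of_contains _ _ hcon', hd', List.map_map]
    apply List.map_congr_left
    intro p _
    by_cases hb : p.1 = w
    · simp only [Function.comp_apply, hb, beq_self_eq_true, if_true]
      congr 1
      push_cast
      ring
    · simp [Function.comp_apply, hb]

-- t > 0 updates on an absent key append (w, t)
theorem pv_items_updN_not (w : String) (t : Nat) (ht : 0 < t) (d : PySem.Dict String Int)
    (hnd : d.keys.Nodup) (hcon : d.contains w = false) :
    ((update_dict_with_word w)^[t] d).items = d.items ++ [(w, (t : Int))] := by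
  cases t with
  | zero => omega
  | succ t =>
    rw [Function.iterate_succ_apply]
    have hupd : update_dict_with_word w d = d.insert w 1 := by
      rw [update_dict_with_word, if_pos hcon]
    have hitems1 : (update_dict_with_word w d).items = d.items ++ [(w, 1)] := by
      rw [hupd, PySem.Dict.items_insert_of_not_contains _ _ hcon]
    have hmem1 : (w, (1 : Int)) ∈ (update_dict_with_word w d).items := by
      rw [hitems1]; simp
    have hnd1 : (update_dict_with_word w d).keys.Nodup := by
      show ((update_dict_with_word w d).items.map Prod.fst).Nodup
      rw [hitems1, List.map_append]
      simp only [List.map_cons, List.map_nil]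
      rw [List.nodup_append]
      refine ⟨hnd, List.nodup_singleton _, ?_⟩
      intro a ha b hb
      rw [List.mem_singleton] at hb
      subst hb
      intro hab
      subst hab
      have hk : d.contains a = true := (PySem.Dict.contains_iff_mem_keys d a).mpr ha
      rw [hk] at hcon
      cases hcon
    rw [pv_items_updN_mem w t _ 1 hnd1 hmem1, hitems1, List.map_append]
    have hcg : ∀ p ∈ d.items, (if (p.1 == w) = true then (w, 1 + (t : Int)) else p) = p := by
      intro p hp
      have hpne : p.1 ≠ w := by
        intro hb
        have hc2 := pv_contains_of_mem_items d w p.2 (by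
          have hpp : p = (p.1, p.2) := rfl
          rw [hpp, hb] at hp
          exact hp)
        rw [hc2] at hcon
        cases hcon
      simp [hpne]
    rw [List.map_congr_left hcg, List.map_id']
    simp only [List.map_cons, List.map_nil, beq_self_eq_true, if_true]
    have hone : (1 : Int) + (t : Int) = ((t + 1 : Nat) : Int) := by push_cast; ring
    rw [hone]

-- first-occurrence dedup grows by one exactly on fresh words
theorem pv_ofList_append (l : List String) (w : String) :
    PySem.Set.ofList (l ++ [w])
      = if w ∈ l then PySem.Set.ofList l else PySem.Set.ofList l ++ [w] := by
  unfold PySem.Set.ofList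
  rw [List.foldl_append, List.foldl_cons, List.foldl_nil]
  show PySem.Set.add _ w = _
  unfold PySem.Set.add PySem.Set.contains
  by_cases h : w ∈ l
  · rw [if_pos, if_pos h]
    rw [List.contains_iff_mem]
    exact (PySem.Set.mem_ofList l w).mpr h
  · rw [if_neg, if_neg h]
    rw [List.contains_iff_mem]
    intro hmem
    exact h ((PySem.Set.mem_ofList l w).mp hmem)

-- the canonical value of A's dictionary after processing a prefix of the word list
def pvTarget (M : List (List String)) (dsL : List Char) (pre : List String) : List (String × Int) :=
  ((PySem.Set.ofList pre).filter (fun w => decide (0 < pvK M dsL w))).map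
    (fun w => (w, (pre.count w : Int) * (pvK M dsL w : Int)))

theorem pv_target_keys (M : List (List String)) (dsL : List Char) (pre : List String) :
    (pvTarget M dsL pre).map Prod.fst
      = (PySem.Set.ofList pre).filter (fun w => decide (0 < pvK M dsL w)) := by
  unfold pvTarget
  rw [List.map_map]
  have hcg : ∀ x ∈ (PySem.Set.ofList pre).filter (fun w => decide (0 < pvK M dsL w)),
      (Prod.fst ∘ fun w => (w, (pre.count w : Int) * (pvK M dsL w : Int))) x = x := fun x _ => rfl
  rw [List.map_congr_left hcg, List.map_id']

theorem pv_toList_ne (w : String) (h : w ≠ "") : ∃ f rest, w.toList = f :: rest := by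
  cases hw : w.toList with
  | nil =>
    exfalso
    apply h
    have := congrArg String.ofList hw
    simpa using this
  | cons f rest => exact ⟨f, rest, rfl⟩

-- the invariant of A's main loop
theorem pv_A_invariant (M : List (List String)) (dsL : List Char) (pre : List String)
    (hok : ∀ w ∈ pre, w ≠ "") :
    (pre.foldl (fun d word =>
      match word.toList with
      | [] => d
      | first :: _ =>
        match (build_letter_to_indices M).get? (String.ofList [first]) with
        | none => d
        | some indices =>
          indices.foldl (fun d pos =>
            dsL.foldl (fun d direction =>
              if does_word_match_index word M pos.1 pos.2 direction
              then update_dict_with_word word d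
              else d) d) d) PySem.Dict.empty).items = pvTarget M dsL pre := by
  induction pre using List.reverseRecOn with
  | nil => rfl
  | append_singleton pre w ih =>
    have hpre := ih (fun x hx => hok x (List.mem_append_left _ hx))
    have hwne : w ≠ "" := hok w (List.mem_append_right _ (List.mem_singleton.mpr rfl))
    obtain ⟨f, rest, hw⟩ := pv_toList_ne w hwne
    rw [List.foldl_append, List.foldl_cons, List.foldl_nil]
    rw [hw]
    dsimp only
    rw [pv_word_step M dsL w f rest hw]
    set dA := pre.foldl (fun d word =>
      match word.toList with
      | [] => d
      | first :: _ =>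
        match (build_letter_to_indices M).get? (String.ofList [first]) with
        | none => d
        | some indices =>
          indices.foldl (fun d pos =>
            dsL.foldl (fun d direction =>
              if does_word_match_index word M pos.1 pos.2 direction
              then update_dict_with_word word d
              else d) d) d) PySem.Dict.empty with hdA
    have hkeys : dA.keys = (PySem.Set.ofList pre).filter (fun w => decide (0 < pvK M dsL w)) := by
      show dA.items.map Prod.fst = _
      rw [hpre, pv_target_keys]
    have hnd : dA.keys.Nodup := by
      rw [hkeys]
      exact (PySem.Set.nodup_ofList pre).filter _
    by_cases hK : pvK M dsL w = 0
    · rw [hK, Function.iterate_zero_apply, hpre]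
      unfold pvTarget
      rw [pv_ofList_append]
      by_cases hmem : w ∈ pre
      · rw [if_pos hmem]
        apply List.map_congr_left
        intro x hx
        have hxw : x ≠ w := by
          intro hxw
          subst hxw
          rw [List.mem_filter] at hx
          simp only [decide_eq_true_eq] at hx
          omega
        rw [List.count_append, List.count_singleton]
        simp [Ne.symm hxw]
      · rw [if_neg hmem, List.filter_append]
        have hfw : ([w].filter (fun x => decide (0 < pvK M dsL x))) = [] := by
          simp [hK]
        rw [hfw, List.append_nil]
        apply List.map_congr_left
        intro x hx
        have hxw : x ≠ w := by
          intro hxw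
          subst hxw
          rw [List.mem_filter] at hx
          exact hmem ((PySem.Set.mem_ofList pre x).mp hx.1)
        rw [List.count_append, List.count_singleton]
        simp [Ne.symm hxw]
    · have hKpos : 0 < pvK M dsL w := Nat.pos_of_ne_zero hK
      by_cases hmem : w ∈ pre
      · have hwt : w ∈ (PySem.Set.ofList pre).filter (fun x => decide (0 < pvK M dsL x)) :=
          List.mem_filter.mpr ⟨(PySem.Set.mem_ofList pre w).mpr hmem, by simpa using hKpos⟩
        have hitem : (w, (pre.count w : Int) * (pvK M dsL w : Int)) ∈ dA.items := by
          rw [hpre]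
          exact List.mem_map.mpr ⟨w, hwt, rfl⟩
        rw [pv_items_updN_mem w (pvK M dsL w) dA _ hnd hitem, hpre]
        unfold pvTarget
        rw [pv_ofList_append, if_pos hmem, List.map_map]
        apply List.map_congr_left
        intro x hx
        by_cases hxw : x = w
        · subst hxw
          simp only [Function.comp_apply, beq_self_eq_true, if_true]
          congr 1
          rw [List.count_append, List.count_singleton]
          simp only [beq_self_eq_true, if_true]
          push_cast
          ring
        · have hbx : (x == w) = false := beq_eq_false_iff_ne.mpr hxw
          simp only [Function.comp_apply, hbx, Bool.false_eq_true, if_false]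
          rw [List.count_append, List.count_singleton]
          simp [Ne.symm hxw]
      · have hconF : dA.contains w = false := by
          rw [Bool.eq_false_iff]
          intro hc
          rw [PySem.Dict.contains_iff_mem_keys, hkeys, List.mem_filter] at hc
          exact hmem ((PySem.Set.mem_ofList pre w).mp hc.1)
        rw [pv_items_updN_not w (pvK M dsL w) hKpos dA hnd hconF, hpre]
        unfold pvTarget
        rw [pv_ofList_append, if_neg hmem, List.filter_append]
        have hfw : ([w].filter (fun x => decide (0 < pvK M dsL x))) = [w] := by
          simp [hKpos]
        rw [hfw, List.map_append]
        congr 1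
        · apply List.map_congr_left
          intro x hx
          have hxw : x ≠ w := by
            intro hxw
            subst hxw
            rw [List.mem_filter] at hx
            exact hmem ((PySem.Set.mem_ofList pre x).mp hx.1)
          rw [List.count_append, List.count_singleton]
          simp [Ne.symm hxw]
        · simp only [List.map_cons, List.map_nil]
          have hcw : (pre ++ [w]).count w = 1 := by
            rw [List.count_append, List.count_singleton]
            simp [List.count_eq_zero_of_not_mem hmem]
          rw [hcw]
          simp

theorem pv_numCols (M : List (List String)) :
    (match M with | [] => 0 | row0 :: _ => row0.length) = pvNC M := by
  cases M <;> rfl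

-- B's multiplicity/order accumulator: order is the first-occurrence dedup, values are counts
theorem pv_B_state (wl : List String) :
    (wl.foldl (fun (st : PySem.Dict String Int × List String) w =>
        if st.1.contains w then (st.1.modify w 0 (· + 1), st.2)
        else (st.1.insert w 1, st.2 ++ [w])) (PySem.Dict.empty, [])).2 = PySem.Set.ofList wl
    ∧ (∀ x, (wl.foldl (fun (st : PySem.Dict String Int × List String) w =>
        if st.1.contains w then (st.1.modify w 0 (· + 1), st.2)
        else (st.1.insert w 1, st.2 ++ [w])) (PySem.Dict.empty, [])).1.getD x 0 = (wl.count x : Int))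
    ∧ (∀ x, ((wl.foldl (fun (st : PySem.Dict String Int × List String) w =>
        if st.1.contains w then (st.1.modify w 0 (· + 1), st.2)
        else (st.1.insert w 1, st.2 ++ [w])) (PySem.Dict.empty, [])).1.contains x = true ↔ x ∈ wl)) := by
  induction wl using List.reverseRecOn with
  | nil =>
    refine ⟨rfl, fun x => by simp [PySem.Dict.getD_empty], fun x => by simp [PySem.Dict.contains_empty]⟩
  | append_singleton pre w ih =>
    obtain ⟨ih2, ihg, ihc⟩ := ih
    rw [List.foldl_append, List.foldl_cons, List.foldl_nil]
    by_cases hc : (pre.foldl (fun (st : PySem.Dict String Int × List String) w =>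
        if st.1.contains w then (st.1.modify w 0 (· + 1), st.2)
        else (st.1.insert w 1, st.2 ++ [w])) (PySem.Dict.empty, [])).1.contains w = true
    · rw [if_pos hc]
      have hmem : w ∈ pre := (ihc w).mp hc
      refine ⟨?_, fun x => ?_, fun x => ?_⟩
      · show _ = PySem.Set.ofList (pre ++ [w])
        rw [pv_ofList_append, if_pos hmem]
        exact ih2
      · show ((_ : PySem.Dict String Int).insert w _).getD x 0 = _
        rw [PySem.Dict.getD_insert]
        by_cases hxw : x = w
        · subst hxw
          rw [if_pos rfl, ihg x, List.count_append, List.count_singleton]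
          push_cast
          simp
        · rw [if_neg hxw, ihg x, List.count_append, List.count_singleton]
          simp [Ne.symm hxw]
      · show ((_ : PySem.Dict String Int).insert w _).contains x = true ↔ _
        rw [PySem.Dict.contains_insert]
        simp only [Bool.or_eq_true, beq_iff_eq]
        rw [ihc x]
        constructor
        · rintro (rfl | hx)
          · exact List.mem_append_right _ (by simp)
          · exact List.mem_append_left _ hx
        · intro hx
          rcases List.mem_append.mp hx with hx | hx
          · exact Or.inr hx
          · exact Or.inl (by simpa using hx)
    · rw [if_neg hc]
      have hmem : w ∉ pre := fun hm => hc ((ihc w).mpr hm)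
      have hcf : (pre.foldl (fun (st : PySem.Dict String Int × List String) w =>
          if st.1.contains w then (st.1.modify w 0 (· + 1), st.2)
          else (st.1.insert w 1, st.2 ++ [w])) (PySem.Dict.empty, [])).1.contains w = false := by
        simpa using hc
      refine ⟨?_, fun x => ?_, fun x => ?_⟩
      · show _ ++ [w] = PySem.Set.ofList (pre ++ [w])
        rw [pv_ofList_append, if_neg hmem, ih2]
      · show ((_ : PySem.Dict String Int).insert w 1).getD x 0 = _
        rw [PySem.Dict.getD_insert]
        by_cases hxw : x = w
        · subst hxw
          rw [if_pos rfl, List.count_append, List.count_singleton,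
            List.count_eq_zero_of_not_mem hmem]
          simp
        · rw [if_neg hxw, ihg x, List.count_append, List.count_singleton]
          simp [Ne.symm hxw]
      · show ((_ : PySem.Dict String Int).insert w 1).contains x = true ↔ _
        rw [PySem.Dict.contains_insert]
        simp only [Bool.or_eq_true, beq_iff_eq]
        rw [ihc x]
        constructor
        · rintro (rfl | hx)
          · exact List.mem_append_right _ (by simp)
          · exact List.mem_append_left _ hx
        · intro hx
          rcases List.mem_append.mp hx with hx | hx
          · exact Or.inr hx
          · exact Or.inl (by simpa using hx)

-- B's per-word counting loop computes pvK
theorem pv_B_m (M : List (List String)) (dsL : List Char) (w : String) (f : Char)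
    (rest : List Char) (hw : w.toList = f :: rest) :
    (List.range M.length).foldl (fun m (r : Nat) =>
      (List.range (pvNC M)).foldl (fun m (c : Nat) =>
        if pvCell M (r : Int) (c : Int) ≠ String.ofList [f] then m
        else dsL.foldl (fun m d =>
          match pvDirMove d with
          | none => m
          | some (dr, dc) =>
            if pvRayMatches M (M.length : Int) (pvNC M : Int) (f :: rest) (r : Int) (c : Int) dr dc
            then m + 1 else m) m) m) (0 : Int) = ((pvK M dsL w : Nat) : Int) := by
  rw [← hw]
  have hcol : ∀ (r : Nat) (m : Int),
      (List.range (pvNC M)).foldl (fun m (c : Nat) =>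
        if pvCell M (r : Int) (c : Int) ≠ String.ofList [f] then m
        else dsL.foldl (fun m d =>
          match pvDirMove d with
          | none => m
          | some (dr, dc) =>
            if pvRayMatches M (M.length : Int) (pvNC M : Int) w.toList (r : Int) (c : Int) dr dc
            then m + 1 else m) m) m
      = m + ((List.range (pvNC M)).map (fun (c : Nat) =>
          (if pvCell M (r : Int) (c : Int) ≠ String.ofList [f] then (0 : Int)
           else (dsL.countP (fun d =>
             match pvDirMove d with
             | none => false
             | some (dr, dc) =>
               pvRayMatches M (M.length : Int) (pvNC M : Int) w.toList (r : Int) (c : Int) dr dc) : Int)))).sum := by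
    intro r m
    have hcongr : (List.range (pvNC M)).foldl (fun m (c : Nat) =>
        if pvCell M (r : Int) (c : Int) ≠ String.ofList [f] then m
        else dsL.foldl (fun m d =>
          match pvDirMove d with
          | none => m
          | some (dr, dc) =>
            if pvRayMatches M (M.length : Int) (pvNC M : Int) w.toList (r : Int) (c : Int) dr dc
            then m + 1 else m) m) m
      = (List.range (pvNC M)).foldl (fun m (c : Nat) =>
          m + (if pvCell M (r : Int) (c : Int) ≠ String.ofList [f] then (0 : Int)
           else (dsL.countP (fun d =>
             match pvDirMove d with
             | none => false
             | some (dr, dc) =>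
               pvRayMatches M (M.length : Int) (pvNC M : Int) w.toList (r : Int) (c : Int) dr dc) : Int))) m := by
      apply PySem.List.foldl_congr_mem
      intro m2 c _
      by_cases hne : pvCell M (r : Int) (c : Int) ≠ String.ofList [f]
      · rw [if_pos hne, if_pos hne, add_zero]
      · rw [if_neg hne, if_neg hne]
        have hd : dsL.foldl (fun m d =>
            match pvDirMove d with
            | none => m
            | some (dr, dc) =>
              if pvRayMatches M (M.length : Int) (pvNC M : Int) w.toList (r : Int) (c : Int) dr dc
              then m + 1 else m) m2
          = dsL.foldl (fun m d =>
              if (match pvDirMove d with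
                  | none => false
                  | some (dr, dc) =>
                    pvRayMatches M (M.length : Int) (pvNC M : Int) w.toList (r : Int) (c : Int) dr dc)
              then m + 1 else m) m2 := by
          apply PySem.List.foldl_congr_mem
          intro m3 d _
          cases hmv : pvDirMove d with
          | none => simp
          | some p => obtain ⟨dr, dc⟩ := p; rfl
        rw [hd, PySem.List.foldl_count_if]
    rw [hcongr, PySem.List.foldl_add]
  have hrow : (List.range M.length).foldl (fun m (r : Nat) =>
      (List.range (pvNC M)).foldl (fun m (c : Nat) =>
        if pvCell M (r : Int) (c : Int) ≠ String.ofList [f] then m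
        else dsL.foldl (fun m d =>
          match pvDirMove d with
          | none => m
          | some (dr, dc) =>
            if pvRayMatches M (M.length : Int) (pvNC M : Int) w.toList (r : Int) (c : Int) dr dc
            then m + 1 else m) m) m) (0 : Int)
    = (List.range M.length).foldl (fun m (r : Nat) =>
        m + ((List.range (pvNC M)).map (fun (c : Nat) =>
          (if pvCell M (r : Int) (c : Int) ≠ String.ofList [f] then (0 : Int)
           else (dsL.countP (fun d =>
             match pvDirMove d with
             | none => false
             | some (dr, dc) =>
               pvRayMatches M (M.length : Int) (pvNC M : Int) w.toList (r : Int) (c : Int) dr dc) : Int)))).sum) (0 : Int) := by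
    apply PySem.List.foldl_congr_mem
    intro m r _
    exact hcol r m
  rw [hrow, PySem.List.foldl_add, zero_add]
  unfold pvK
  rw [Nat.cast_list_sum, List.map_map]
  apply congrArg List.sum
  apply List.map_congr_left
  intro r hr
  rw [List.mem_range] at hr
  simp only [Function.comp_apply]
  rw [Nat.cast_list_sum, List.map_map]
  apply congrArg List.sum
  apply List.map_congr_left
  intro c hc
  rw [List.mem_range] at hc
  simp only [Function.comp_apply]
  rw [← pv_cnt_eq M dsL w f rest hw r c hr hc]
  by_cases hne : pvCell M (r : Int) (c : Int) ≠ String.ofList [f]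
  · rw [if_pos hne, if_pos hne]
    rfl
  · rw [if_neg hne, if_neg hne]

-- ===== VERDICT (by name: the statement is the Claim_ definition above) =====
theorem find_words_in_matrix_spec : Claim_equal_find_words_in_matrix := by
  intro wl M ds hdom hpre
  obtain ⟨hne, hrect, hdirs⟩ := hpre
  unfold Spec_find_words_in_matrix
  unfold find_words_in_matrix find_words_in_matrix_alt
  dsimp only
  rw [pv_A_invariant M ds.toList wl hne]
  obtain ⟨hord, hget, hcon⟩ := pv_B_state wl
  rw [hord, pv_numCols M]
  have hstepB : ∀ (res : List (String × Int)), ∀ x ∈ PySem.Set.ofList wl,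
      (match x.toList with
        | [] => res
        | first :: _ =>
          if (List.range M.length).foldl (fun m (r : Nat) =>
              (List.range (pvNC M)).foldl (fun m (c : Nat) =>
                if pvCell M (r : Int) (c : Int) ≠ String.ofList [first] then m
                else ds.toList.foldl (fun m d =>
                  match pvDirMove d with
                  | none => m
                  | some (dr, dc) =>
                    if pvRayMatches M (M.length : Int) (pvNC M : Int) x.toList (r : Int) (c : Int) dr dc
                    then m + 1 else m) m) m) (0 : Int) ≠ 0 then
            res ++ [(x, (wl.foldl (fun (st : PySem.Dict String Int × List String) w =>
                if st.1.contains w then (st.1.modify w 0 (· + 1), st.2)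
                else (st.1.insert w 1, st.2 ++ [w])) (PySem.Dict.empty, [])).1.getD x 0 *
              (List.range M.length).foldl (fun m (r : Nat) =>
                (List.range (pvNC M)).foldl (fun m (c : Nat) =>
                  if pvCell M (r : Int) (c : Int) ≠ String.ofList [first] then m
                  else ds.toList.foldl (fun m d =>
                    match pvDirMove d with
                    | none => m
                    | some (dr, dc) =>
                      if pvRayMatches M (M.length : Int) (pvNC M : Int) x.toList (r : Int) (c : Int) dr dc
                      then m + 1 else m) m) m) (0 : Int))]
          else res)
      = (if decide (0 < pvK M ds.toList x) then
          res ++ [(x, (wl.count x : Int) * ((pvK M ds.toList x : Nat) : Int))] else res) := by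
    intro res x hx
    have hxwl : x ∈ wl := (PySem.Set.mem_ofList wl x).mp hx
    obtain ⟨f, rest, hxw⟩ := pv_toList_ne x (hne x hxwl)
    rw [hxw]
    dsimp only
    rw [pv_B_m M ds.toList x f rest hxw, hget x]
    by_cases hK : 0 < pvK M ds.toList x
    · rw [if_pos (by exact_mod_cast Nat.pos_iff_ne_zero.mp hK), if_pos (by simpa using hK)]
    · have h0 : pvK M ds.toList x = 0 := by omega
      rw [h0]
      simp
  rw [PySem.List.foldl_congr_mem (PySem.Set.ofList wl) _
    (fun res x => if decide (0 < pvK M ds.toList x) then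
      res ++ [(x, (wl.count x : Int) * ((pvK M ds.toList x : Nat) : Int))] else res) [] hstepB]
  rw [PySem.List.foldl_append_if]
  rw [List.nil_append]
  rfl
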